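-- pv_equiv track=rewrite | github.com/pegasystems/pega-datascientist-tools | python/cdhtools/ADMTrees.py | parseSplitValuesWithSpaces
-- ===== SOURCE A (Python) =====
-- from typing import Dict, List, Tuple, Optional, Set, Union
--
-- def parseSplitValuesWithSpaces(value) -> Tuple[str, str, str]:
--     splittypes = {">", "<", "in", "is", "=="}
--     stage = "predictor"
--     variable = ""
--     sign = ""
--     splitvalue = ""
--
--     for item in value.split(" "):
--         if item in splittypes:
--             stage = "sign"
--         if stage == "predictor":
--             variable += " " + item
--         elif stage == "values":
--             splitvalue += item
--         elif stage == "sign":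
--             sign = item
--             stage = "values"
--     variable = variable.strip()
--     return variable, sign, splitvalue
-- ===== SOURCE B (Python) =====
-- def parseSplitValuesWithSpaces(value):
--     splittypes = {">", "<", "in", "is", "=="}
--     tokens = value.split(" ")
--     idx = 0
--     while idx < len(tokens) and tokens[idx] not in splittypes:
--         idx += 1
--     variable = " ".join(tokens[:idx]).strip()
--     sign = ""
--     splitvalue = ""
--     for token in tokens[idx:]:
--         if token in splittypes:
--             sign = token
--         else:
--             splitvalue += token
--     return variable, sign, splitvalue
-- ===== Notes on version B (the rewrite author's own statement) =====
-- stated objective: simpler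
-- what changed: Replaces A's three-state stage machine threaded through one loop by an index-based decomposition: find the first split-type token, join the prefix tokens with spaces to form the variable, and run one plain tail pass that records the last split-type token as sign and concatenates the rest as splitvalue.
import Mathlib
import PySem

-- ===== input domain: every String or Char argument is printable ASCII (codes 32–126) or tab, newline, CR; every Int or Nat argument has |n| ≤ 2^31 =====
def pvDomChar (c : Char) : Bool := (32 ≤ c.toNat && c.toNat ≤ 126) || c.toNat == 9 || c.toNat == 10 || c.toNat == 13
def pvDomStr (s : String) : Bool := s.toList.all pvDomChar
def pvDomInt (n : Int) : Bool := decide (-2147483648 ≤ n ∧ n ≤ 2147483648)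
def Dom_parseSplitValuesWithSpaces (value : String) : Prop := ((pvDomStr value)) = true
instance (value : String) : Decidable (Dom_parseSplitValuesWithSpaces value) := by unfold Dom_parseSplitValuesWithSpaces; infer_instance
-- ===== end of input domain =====

-- B replaces A's three-state stage machine by an index split (tokens before the first
-- split-type token form the variable; one tail pass collects sign and splitvalue): simpler, same cost.

-- ===== PORT A =====
def pvSplittypes : PySem.Set String := PySem.Set.ofList [">", "<", "in", "is", "=="]

-- one iteration of A's loop over state (stage, variable, sign, splitvalue)
def pvStepA (st : String × String × String × String) (item : String) : String × String × String × String :=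
  let stage := if PySem.Set.contains pvSplittypes item then "sign" else st.1
  if stage = "predictor" then (stage, st.2.1 ++ " " ++ item, st.2.2.1, st.2.2.2)
  else if stage = "values" then (stage, st.2.1, st.2.2.1, st.2.2.2 ++ item)
  else if stage = "sign" then ("values", st.2.1, item, st.2.2.2)
  else (stage, st.2.1, st.2.2.1, st.2.2.2)

def parseSplitValuesWithSpaces (value : String) : String × String × String :=
  -- value.split(" "): sep ≠ "" so split? is always `some`
  let st := ((PySem.Str.split? value " ").getD []).foldl pvStepA ("predictor", "", "", "")
  (PySem.Str.strip st.2.1, st.2.2.1, st.2.2.2)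

-- ===== PORT B =====
-- Source B's while loop: index of the first split-type token (length if none)
def pvScan : List String → Nat
  | [] => 0
  | t :: ts => if PySem.Set.contains pvSplittypes t then 0 else pvScan ts + 1

-- one iteration of Source B's tail loop over (sign, splitvalue)
def pvStepB (p : String × String) (t : String) : String × String :=
  if PySem.Set.contains pvSplittypes t then (t, p.2) else (p.1, p.2 ++ t)

def parseSplitValuesWithSpaces_alt (value : String) : String × String × String :=
  let tokens := (PySem.Str.split? value " ").getD []
  let idx := pvScan tokens
  -- tokens[:idx] / tokens[idx:] with 0 ≤ idx ≤ len(tokens) are take/drop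
  let var := PySem.Str.strip (PySem.Str.join " " (tokens.take idx))
  let p := (tokens.drop idx).foldl pvStepB ("", "")
  (var, p.1, p.2)

-- ===== PRECONDITION & SPEC =====
def Spec_parseSplitValuesWithSpaces (value : String) (out : String × String × String) : Prop := out = parseSplitValuesWithSpaces_alt value
instance (value : String) (out : String × String × String) : Decidable (Spec_parseSplitValuesWithSpaces value out) := by unfold Spec_parseSplitValuesWithSpaces; infer_instance

-- ===== CLAIM (what is proved, stated in full; the proofs are below) =====
def Claim_equal_parseSplitValuesWithSpaces : Prop := ∀ (value : String), Dom_parseSplitValuesWithSpaces value → Spec_parseSplitValuesWithSpaces value (parseSplitValuesWithSpaces value)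

-- ===== LEMMAS AND PROOFS =====

-- A's variable accumulator over the predictor-phase tokens, as a standalone function
def pvJoinSp : List String → String
  | [] => ""
  | t :: ts => " " ++ t ++ pvJoinSp ts

-- its List Char image
def pvJoinSpL : List (List Char) → List Char
  | [] => []
  | c :: cs => ' ' :: (c ++ pvJoinSpL cs)

lemma pvJoinSp_toList (pre : List String) :
    (pvJoinSp pre).toList = pvJoinSpL (pre.map String.toList) := by
  induction pre with
  | nil => rfl
  | cons t ts ih => simp [pvJoinSp, pvJoinSpL, ih]

lemma pvJoinSpL_eq_intercalate (l : List Char) (ls : List (List Char)) :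
    pvJoinSpL (l :: ls) = ' ' :: List.intercalate [' '] (l :: ls) := by
  induction ls generalizing l with
  | nil => simp [pvJoinSpL, List.intercalate, List.intersperse]
  | cons l2 ls ih =>
    rw [show List.intercalate [' '] (l :: l2 :: ls)
          = l ++ [' '] ++ List.intercalate [' '] (l2 :: ls) from by
        simp [List.intercalate, List.intersperse]]
    have h2 := ih l2
    simp only [pvJoinSpL, List.cons.injEq, true_and] at h2
    simp [pvJoinSpL, h2]

lemma strip_space_cons (cs : List Char) :
    PySem.Chars.strip (' ' :: cs) = PySem.Chars.strip cs := by
  simp [PySem.Chars.strip, PySem.Chars.lstrip, List.dropWhile, PySem.Chars.isspace]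

-- strip(A's " "-prefixed accumulation) = strip(" ".join(pre))
lemma strip_joinSp (pre : List String) :
    PySem.Str.strip (pvJoinSp pre) = PySem.Str.strip (PySem.Str.join " " pre) := by
  apply String.toList_inj.mp
  rw [PySem.Str.toList_strip, PySem.Str.toList_strip, PySem.Str.toList_join,
      pvJoinSp_toList]
  cases pre with
  | nil => rfl
  | cons t ts =>
    rw [List.map_cons, pvJoinSpL_eq_intercalate, strip_space_cons]
    rfl

-- the values phase of A is exactly B's tail loop
lemma foldA_values (ts : List String) (var sign sv : String) :
    ts.foldl pvStepA ("values", var, sign, sv) = ("values", var, ts.foldl pvStepB (sign, sv)) := by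
  induction ts generalizing sign sv with
  | nil => rfl
  | cons t ts ih =>
    by_cases h : t ∈ pvSplittypes
    · simp [List.foldl_cons, pvStepA, pvStepB, h, ih]
    · simp [List.foldl_cons, pvStepA, pvStepB, h, ih]

-- the whole of A's loop, started in the predictor stage
lemma foldA_pred (ts : List String) (var : String) :
    (ts.foldl pvStepA ("predictor", var, "", "")).2 =
      (var ++ pvJoinSp (ts.take (pvScan ts)), (ts.drop (pvScan ts)).foldl pvStepB ("", "")) := by
  induction ts generalizing var with
  | nil => simp [pvScan, pvJoinSp]
  | cons t ts ih =>
    by_cases h : t ∈ pvSplittypes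
    · simp [List.foldl_cons, pvStepA, pvScan, h, foldA_values, pvJoinSp, pvStepB]
    · simp [List.foldl_cons, pvStepA, pvScan, h, ih, pvJoinSp, String.append_assoc]

-- ===== VERDICT (by name: the statement is the Claim_ definition above) =====
theorem parseSplitValuesWithSpaces_spec : Claim_equal_parseSplitValuesWithSpaces := by
  intro value _
  unfold Spec_parseSplitValuesWithSpaces parseSplitValuesWithSpaces parseSplitValuesWithSpaces_alt
  have h := foldA_pred ((PySem.Str.split? value " ").getD []) ""
  simp only [String.empty_append] at h
  simp [h, strip_joinSp]
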